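-- pv_equiv track=rewrite | github.com/remusezequiel/Lic.-Ciencia-de-Datos | Algoritmos_Y_Estructuras_De_Datos/aed_1/Practica/CodigoGuiasPython/guia7.py | tiene_tres_o_mas_vocales_distintas
-- ===== SOURCE A (Python) =====
-- def tiene_tres_o_mas_vocales_distintas(cadena:str)->bool:
--     """
--         Recorrer una palabra en formato string y devolver True si ésta
--         tiene al menos 3 vocales distintas y False en caso contrario.
--     """
--     contadores:list[int]=[0,0,0,0,0]
--     cuento_vocales:int=0
--     for i in cadena:
--         if i=='a':
--             contadores[0]+=1
--         if i=='e':
--             contadores[1]+=1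
--         if i=='i':
--             contadores[2]+=1
--         if i=='o':
--             contadores[3]+=1
--         if i=='u':
--             contadores[4]+=1
--     for vocal in contadores:
--         if vocal != 0:
--             cuento_vocales+=1
--     if cuento_vocales>=3:
--         return True
--     else:
--         return False
-- ===== SOURCE B (Python) =====
-- def tiene_tres_o_mas_vocales_distintas(cadena: str) -> bool:
--     # Loop over the five vowels, not over the string: count which vowels occur.
--     return sum(1 for v in "aeiou" if v in cadena) >= 3
-- ===== Notes on version B (the rewrite author's own statement) =====
-- stated objective: faster
-- what changed: Inverts the traversal: instead of scanning every character in Python with five counters plus a second counting loop, B iterates over the five vowels and sums a substring-membership test of each vowel in the string.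
import Mathlib
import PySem

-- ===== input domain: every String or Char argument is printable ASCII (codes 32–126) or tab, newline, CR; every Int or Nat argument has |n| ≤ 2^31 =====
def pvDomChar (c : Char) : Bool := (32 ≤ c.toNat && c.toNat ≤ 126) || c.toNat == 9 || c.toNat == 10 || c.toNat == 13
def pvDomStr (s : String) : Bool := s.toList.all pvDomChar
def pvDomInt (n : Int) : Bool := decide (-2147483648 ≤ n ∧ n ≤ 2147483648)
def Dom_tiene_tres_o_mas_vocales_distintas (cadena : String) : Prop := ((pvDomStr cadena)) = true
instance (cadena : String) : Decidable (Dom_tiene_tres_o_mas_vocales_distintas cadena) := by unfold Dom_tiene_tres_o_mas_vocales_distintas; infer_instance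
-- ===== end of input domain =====

-- B inverts the traversal: it loops over the five vowels and sums a membership
-- test of each in the string, instead of A's per-character pass over the string
-- with five counters plus a second counting loop (idiomatic).

-- ===== PORT A =====
-- first loop of A: five per-vowel occurrence counters, independent ifs in order
def pvCountA : List Char → Int × Int × Int × Int × Int → Int × Int × Int × Int × Int
  | [], st => st
  | c :: rest, (ca, ce, ci, co, cu) =>
      pvCountA rest
        (if c = 'a' then ca + 1 else ca,
         if c = 'e' then ce + 1 else ce,
         if c = 'i' then ci + 1 else ci,
         if c = 'o' then co + 1 else co,
         if c = 'u' then cu + 1 else cu)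

def tiene_tres_o_mas_vocales_distintas (cadena : String) : Bool :=
  let st := pvCountA cadena.toList (0, 0, 0, 0, 0)
  let contadores : List Int := [st.1, st.2.1, st.2.2.1, st.2.2.2.1, st.2.2.2.2]
  let cuento_vocales : Int :=
    contadores.foldl (fun acc vocal => if vocal ≠ 0 then acc + 1 else acc) 0
  if cuento_vocales ≥ 3 then true else false

-- ===== PORT B =====
-- sum(1 for v in "aeiou" if v in cadena) >= 3
def tiene_tres_o_mas_vocales_distintas_alt (cadena : String) : Bool :=
  decide (3 ≤ ("aeiou".toList.foldl
      (fun acc v => if cadena.toList.contains v then acc + 1 else acc) (0 : Int)))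

-- ===== PRECONDITION & SPEC =====
def Spec_tiene_tres_o_mas_vocales_distintas (cadena : String) (out : Bool) : Prop := out = tiene_tres_o_mas_vocales_distintas_alt cadena
instance (cadena : String) (out : Bool) : Decidable (Spec_tiene_tres_o_mas_vocales_distintas cadena out) := by unfold Spec_tiene_tres_o_mas_vocales_distintas; infer_instance

-- ===== CLAIM (what is proved, stated in full; the proofs are below) =====
def Claim_equal_tiene_tres_o_mas_vocales_distintas : Prop := ∀ (cadena : String), Dom_tiene_tres_o_mas_vocales_distintas cadena → Spec_tiene_tres_o_mas_vocales_distintas cadena (tiene_tres_o_mas_vocales_distintas cadena)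

-- ===== LEMMAS AND PROOFS =====

-- A's counter loop computes the occurrence counts of the five vowels
theorem pvCountA_eq (l : List Char) : ∀ (ca ce ci co cu : Int),
    pvCountA l (ca, ce, ci, co, cu) =
      (ca + l.count 'a', ce + l.count 'e', ci + l.count 'i',
       co + l.count 'o', cu + l.count 'u') := by
  induction l with
  | nil => intro ca ce ci co cu; simp [pvCountA]
  | cons c rest ih =>
    intro ca ce ci co cu
    simp only [pvCountA, ih, List.count_cons]
    by_cases h1 : c = 'a' <;> by_cases h2 : c = 'e' <;> by_cases h3 : c = 'i' <;>
      by_cases h4 : c = 'o' <;> by_cases h5 : c = 'u' <;>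
      simp_all <;> omega

theorem tiene_tres_o_mas_vocales_distintas_spec : Claim_equal_tiene_tres_o_mas_vocales_distintas := by
  intro cadena _
  unfold Spec_tiene_tres_o_mas_vocales_distintas tiene_tres_o_mas_vocales_distintas tiene_tres_o_mas_vocales_distintas_alt
  simp only [pvCountA_eq, List.foldl]
  have h : ∀ v : Char, (cadena.toList.count v ≠ (0:Nat)) ↔ cadena.toList.contains v = true := by
    intro v; simp [List.count_pos_iff.symm, Nat.pos_iff_ne_zero]
  by_cases ha : cadena.toList.contains 'a' <;>
  by_cases he : cadena.toList.contains 'e' <;>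
  by_cases hi : cadena.toList.contains 'i' <;>
  by_cases ho : cadena.toList.contains 'o' <;>
  by_cases hu : cadena.toList.contains 'u' <;>
    simp_all [Int.natCast_eq_zero]

-- ===== VERDICT (by name: the statement is the Claim_ definition above) =====
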